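-- pv_equiv track=rewrite | github.com/salomeviana/ProyectoLogica2 | EntregaFinal.py | dicToString
-- ===== SOURCE A (Python) =====
-- LetrasProposicionales= ['a','b','c','d','e','f','g','h','i','j','k','l','m','n','o','p','q','r','s','t','u','v','w','x','y','z','0','1','2','3','4','5','6','7','8','9']
--
-- def dicToString(interpretacion):
--     #Dadas una interpretaciones crea una lista cuyos elementos literales (sin perdida de generalidad si I(p)=0 mete en la lisa -p y si I(p)=1 mete en la lista p)
--     #Input: interpretacion, diccionario (intepretaciones que hacen satisfacible la formula)
--     #Output: formula, lista de strings (litelares)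
--     formula=[]
--     for i in LetrasProposicionales:
--         if i in interpretacion:
--             if interpretacion[i]==1:
--                 formula.append(i)
--             if interpretacion[i]==0:
--                 formula.append('-'+i)
--     return formula
-- ===== SOURCE B (Python) =====
-- LetrasProposicionales= ['a','b','c','d','e','f','g','h','i','j','k','l','m','n','o','p','q','r','s','t','u','v','w','x','y','z','0','1','2','3','4','5','6','7','8','9']
--
-- def dicToString(interpretacion):
--     # Traverse the interpretation itself (not the fixed letter list): tag each
--     # admissible item with its letter's rank, then sort by rank and drop the tags.
--     rank = {c: r for r, c in enumerate(LetrasProposicionales)}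
--     pairs = []
--     for k, v in interpretacion.items():
--         if k in rank:
--             if v == 1:
--                 pairs.append((rank[k], k))
--             elif v == 0:
--                 pairs.append((rank[k], '-' + k))
--     pairs.sort(key=lambda p: p[0])
--     return [lit for _, lit in pairs]
-- ===== Notes on version B (the rewrite author's own statement) =====
-- stated objective: alternative
-- what changed: A scans the fixed 36-letter list testing each letter for membership in the interpretation; B traverses the interpretation's own items once, tagging each key that is a letter with value 1/0 with that letter's precomputed rank, then sorts the tagged pairs by rank and drops the tags.
import Mathlib
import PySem

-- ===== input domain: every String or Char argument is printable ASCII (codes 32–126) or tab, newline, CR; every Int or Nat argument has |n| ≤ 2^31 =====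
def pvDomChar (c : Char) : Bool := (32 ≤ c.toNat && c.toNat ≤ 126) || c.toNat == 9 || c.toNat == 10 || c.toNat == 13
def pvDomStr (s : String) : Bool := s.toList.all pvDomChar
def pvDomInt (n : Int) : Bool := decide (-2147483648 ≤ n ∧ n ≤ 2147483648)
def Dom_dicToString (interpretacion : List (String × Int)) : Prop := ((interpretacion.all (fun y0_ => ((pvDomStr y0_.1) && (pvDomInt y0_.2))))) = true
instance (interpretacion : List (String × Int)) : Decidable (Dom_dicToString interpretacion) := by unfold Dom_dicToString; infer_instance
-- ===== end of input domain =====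

-- B reverses the traversal: instead of scanning the fixed letter list with a membership test
-- per letter, it walks the interpretation's items once, tags admissible items with the
-- letter's precomputed rank, sorts by rank and drops the tags (objective: alternative).

-- ===== PORT A =====
def pvLetras : List String :=
  ["a","b","c","d","e","f","g","h","i","j","k","l","m","n","o","p","q","r","s",
   "t","u","v","w","x","y","z","0","1","2","3","4","5","6","7","8","9"]

def dicToString (interpretacion : List (String × Int)) : List String :=
  let d : PySem.Dict String Int := PySem.Dict.mk interpretacion
  pvLetras.foldl (fun formula i =>
    if d.contains i then
      let formula := if d.get? i = some 1 then formula ++ [i] else formula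
      if d.get? i = some 0 then formula ++ ["-" ++ i] else formula
    else formula) []

-- ===== PORT B =====
-- rank = {c: r for r, c in enumerate(LetrasProposicionales)}
def pvRank : PySem.Dict String Int :=
  PySem.Dict.mk ((PySem.List.enumerate pvLetras).map (fun p => (p.2, p.1)))

def dicToString_alt (interpretacion : List (String × Int)) : List String :=
  let pairs := interpretacion.foldl (fun pairs kv =>
    if pvRank.contains kv.1 then
      -- rank[k] is guarded by 'k in rank', so getD is exact here
      if kv.2 = 1 then pairs ++ [(pvRank.getD kv.1 0, kv.1)]
      else if kv.2 = 0 then pairs ++ [(pvRank.getD kv.1 0, "-" ++ kv.1)]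
      else pairs
    else pairs) ([] : List (Int × String))
  (PySem.List.sorted pairs (fun p => p.1) false).map (fun p => p.2)

-- ===== PRECONDITION & SPEC =====
-- Pre_ excludes association lists with duplicate keys: they cannot arise from A's Python dict
-- argument, and on them the assoc-list first-vs-last-match choice is accidental.
def Pre_dicToString (interpretacion : List (String × Int)) : Prop :=
  (interpretacion.map Prod.fst).Nodup
instance (interpretacion : List (String × Int)) : Decidable (Pre_dicToString interpretacion) := by
  unfold Pre_dicToString; infer_instance

def pvWitness_dicToString : (List (String × Int)) := [("a", 1), ("b", 0), ("z", 5), ("!", 1)]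

def Spec_dicToString (interpretacion : List (String × Int)) (out : List String) : Prop := out = dicToString_alt interpretacion
instance (interpretacion : List (String × Int)) (out : List String) : Decidable (Spec_dicToString interpretacion out) := by unfold Spec_dicToString; infer_instance

-- ===== CLAIM (what is proved, stated in full; the proofs are below) =====
def Claim_equal_dicToString : Prop := ∀ (interpretacion : List (String × Int)), Dom_dicToString interpretacion → Pre_dicToString interpretacion → Spec_dicToString interpretacion (dicToString interpretacion)

-- ===== LEMMAS AND PROOFS =====

-- the per-letter contribution of port A
def pvGA (d : PySem.Dict String Int) (i : String) : List String :=
  if d.contains i then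
    (if d.get? i = some 1 then [i] else []) ++ (if d.get? i = some 0 then ["-" ++ i] else [])
  else []

theorem pvA_foldl (d : PySem.Dict String Int) (l : List String) (acc : List String) :
    l.foldl (fun formula i =>
      if d.contains i then
        let formula := if d.get? i = some 1 then formula ++ [i] else formula
        if d.get? i = some 0 then formula ++ ["-" ++ i] else formula
      else formula) acc = acc ++ l.flatMap (pvGA d) := by
  induction l generalizing acc with
  | nil => simp
  | cons x xs ih =>
      simp only [List.foldl_cons, List.flatMap_cons, ih, pvGA]
      by_cases hc : d.contains x = true <;> simp [hc] <;>
        rcases h : d.get? x with _ | v <;> simp <;> split_ifs <;> simp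

-- the per-item contribution of port B
def pvGB (kv : String × Int) : List (Int × String) :=
  if pvRank.contains kv.1 then
    if kv.2 = 1 then [(pvRank.getD kv.1 0, kv.1)]
    else if kv.2 = 0 then [(pvRank.getD kv.1 0, "-" ++ kv.1)]
    else []
  else []

theorem pvB_foldl (l : List (String × Int)) (acc : List (Int × String)) :
    l.foldl (fun pairs kv =>
      if pvRank.contains kv.1 then
        if kv.2 = 1 then pairs ++ [(pvRank.getD kv.1 0, kv.1)]
        else if kv.2 = 0 then pairs ++ [(pvRank.getD kv.1 0, "-" ++ kv.1)]
        else pairs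
      else pairs) acc = acc ++ l.flatMap pvGB := by
  induction l generalizing acc with
  | nil => simp
  | cons kv rest ih =>
      simp only [List.foldl_cons, List.flatMap_cons, ih, pvGB]
      split_ifs <;> simp

-- the letter-ordered pair list both sides are compared against
def pvSlot (d : PySem.Dict String Int) (c : String) : List (Int × String) :=
  (d.get? c).elim []
    (fun v =>
      if v = 1 then [(pvRank.getD c 0, c)]
      else if v = 0 then [(pvRank.getD c 0, "-" ++ c)]
      else [])

theorem pvRank_keys : pvRank.keys = pvLetras := by decide

theorem pvRank_contains (c : String) : pvRank.contains c = true ↔ c ∈ pvLetras := by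
  rw [PySem.Dict.contains_iff_mem_keys, pvRank_keys]

theorem pvSlot_map_snd (d : PySem.Dict String Int) (c : String) :
    (pvSlot d c).map (fun p => p.2) = pvGA d c := by
  unfold pvSlot pvGA
  rw [PySem.Dict.contains_eq_isSome_get?]
  rcases h : d.get? c with _ | v
  · simp
  · by_cases h1 : v = 1
    · subst h1; simp
    · by_cases h0 : v = 0
      · subst h0; simp
      · simp [h0, h1]

theorem pvSlot_fst (d : PySem.Dict String Int) (c : String) (p : Int × String)
    (hp : p ∈ pvSlot d c) : p.1 = pvRank.getD c 0 := by
  unfold pvSlot at hp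
  rcases h : d.get? c with _ | v <;> rw [h] at hp <;> simp only [Option.elim] at hp
  · simp at hp
  · split_ifs at hp <;> simp_all

theorem pvSlot_cons_of_ne (kv : String × Int) (rest : List (String × Int)) (c : String)
    (h : c ≠ kv.1) :
    pvSlot (PySem.Dict.mk (kv :: rest)) c = pvSlot (PySem.Dict.mk rest) c := by
  unfold pvSlot
  rw [PySem.Dict.get?_mk_cons]
  simp [show (kv.1 == c) = false by simp [Ne.symm h]]

theorem pvGet?_mk_of_not_mem (l : List (String × Int)) (c : String)
    (h : c ∉ l.map Prod.fst) : (PySem.Dict.mk l).get? c = none := by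
  induction l with
  | nil => rfl
  | cons kv rest ih =>
      simp only [List.map_cons, List.mem_cons, not_or] at h
      rw [PySem.Dict.get?_mk_cons]
      simp only [show (kv.1 == c) = false by simp [Ne.symm h.1], Bool.false_eq_true, if_false]
      exact ih h.2

theorem pvPerm (l : List (String × Int)) (hnd : (l.map Prod.fst).Nodup) :
    (pvLetras.flatMap (pvSlot (PySem.Dict.mk l))).Perm (l.flatMap pvGB) := by
  induction l with
  | nil =>
      rw [List.flatMap_congr (l := pvLetras) (g := fun _ => ([] : List (Int × String)))
        (fun c _ => by unfold pvSlot; rw [pvGet?_mk_of_not_mem _ _ (by simp)]; rfl)]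
      simp
  | cons kv rest ih =>
      simp only [List.map_cons, List.nodup_cons] at hnd
      by_cases hk : kv.1 ∈ pvLetras
      · obtain ⟨L1, L2, hsplit⟩ := List.append_of_mem hk
        have hnodup : pvLetras.Nodup := by decide
        rw [hsplit] at hnodup
        have hmidnd := List.nodup_cons.mp (List.nodup_middle.mp hnodup)
        have h1 : kv.1 ∉ L1 := fun hm => hmidnd.1 (List.mem_append_left _ hm)
        rw [hsplit]
        simp only [List.flatMap_append, List.flatMap_cons]
        rw [List.flatMap_congr (l := L1) (g := pvSlot (PySem.Dict.mk rest))
          (fun c hc => pvSlot_cons_of_ne kv rest c (fun he => h1 (he ▸ hc)))]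
        rw [List.flatMap_congr (l := L2) (g := pvSlot (PySem.Dict.mk rest))
          (fun c hc => pvSlot_cons_of_ne kv rest c (by
            intro he; subst he
            exact hmidnd.1 (List.mem_append_right _ hc)))]
        have hmid : pvSlot (PySem.Dict.mk (kv :: rest)) kv.1 = pvGB kv := by
          unfold pvSlot pvGB
          rw [PySem.Dict.get?_mk_cons]
          simp only [beq_self_eq_true, if_true, Option.elim, (pvRank_contains kv.1).mpr hk]
        have hz : pvSlot (PySem.Dict.mk rest) kv.1 = [] := by
          unfold pvSlot; rw [pvGet?_mk_of_not_mem _ _ hnd.1]; rfl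
        rw [hmid]
        have hih := ih hnd.2
        rw [hsplit, List.flatMap_append, List.flatMap_cons, hz, List.nil_append] at hih
        have hstep : ∀ (A b C : List (Int × String)), (A ++ (b ++ C)).Perm (b ++ (A ++ C)) := by
          intro A b C
          have h := (List.perm_append_comm (l₁ := A) (l₂ := b)).append_right C
          simpa [List.append_assoc] using h
        exact (hstep _ _ _).trans (List.Perm.append_left _ hih)
      · have hc : pvRank.contains kv.1 ≠ true := fun h => hk ((pvRank_contains _).mp h)
        rw [List.flatMap_congr (l := pvLetras) (g := pvSlot (PySem.Dict.mk rest))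
          (fun c hcm => pvSlot_cons_of_ne kv rest c (fun he => hk (he ▸ hcm)))]
        have hGB : pvGB kv = [] := by unfold pvGB; simp [hc]
        rw [List.flatMap_cons, hGB, List.nil_append]
        exact ih hnd.2

theorem pvPairwise_aux (d : PySem.Dict String Int) (L : List String)
    (hL : (L.map (fun c => pvRank.getD c 0)).Pairwise (· < ·)) :
    (L.flatMap (pvSlot d)).Pairwise (fun p q : Int × String => p.1 < q.1) := by
  induction L with
  | nil => simp
  | cons c L ih =>
      simp only [List.map_cons, List.pairwise_cons] at hL
      rw [List.flatMap_cons, List.pairwise_append]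
      refine ⟨?_, ih hL.2, ?_⟩
      · rcases h : d.get? c with _ | v
        · simp [pvSlot, h]
        · simp only [pvSlot, h, Option.elim]
          split_ifs <;> simp
      · intro p hp q hq
        obtain ⟨c', hc', hq'⟩ := List.mem_flatMap.mp hq
        rw [pvSlot_fst d c p hp, pvSlot_fst d c' q hq']
        exact hL.1 _ (List.mem_map_of_mem hc')

theorem pvPairwise (d : PySem.Dict String Int) :
    (pvLetras.flatMap (pvSlot d)).Pairwise (fun p q : Int × String => p.1 < q.1) := by
  exact pvPairwise_aux d pvLetras (by decide)

-- ===== VERDICT (by name: the statement is the Claim_ definition above) =====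
theorem dicToString_spec : Claim_equal_dicToString := by
  intro interpretacion _ hpre
  unfold Spec_dicToString dicToString dicToString_alt
  rw [pvA_foldl, pvB_foldl]
  simp only [List.nil_append]
  rw [PySem.List.sorted_eq_of_perm_of_pairwise_lt (interpretacion.flatMap pvGB)
      (pvLetras.flatMap (pvSlot (PySem.Dict.mk interpretacion))) _
      (pvPerm interpretacion hpre) (pvPairwise (PySem.Dict.mk interpretacion))]
  rw [List.map_flatMap]
  exact List.flatMap_congr fun c _ => (pvSlot_map_snd (PySem.Dict.mk interpretacion) c).symm
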